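-- pv_equiv track=rewrite | github.com/prasanth-ashokan/My-Programs | cf/aug/decimal.py | count
-- ===== SOURCE A (Python) =====
-- p=[10**i for i in range(50)]
--
-- def count(i,s):
--     i=str(i)
--     t=''
--     for j in range(len(i)):
--         if i[j]!=t:
--             y=p[len(i)-j-1]
--             t=i[j]
--             q=int(i[j])*y
--             s=s+q
--     return s
-- ===== SOURCE B (Python) =====
-- def count(i, s):
--     # numeric right-to-left scan: no string conversion, no power table
--     place = 1
--     while i >= 10:
--         d = i % 10
--         i //= 10
--         if d != i % 10:
--             s += d * place
--         place *= 10
--     return s + (i % 10) * place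
-- ===== Notes on version B (the rewrite author's own statement) =====
-- stated objective: alternative
-- what changed: B replaces A's string conversion, power table and left-to-right index loop over str(i) with a purely arithmetic right-to-left digit scan using % and // that compares each digit with its left neighbour and tracks the place value in an accumulator.
import Mathlib
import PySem

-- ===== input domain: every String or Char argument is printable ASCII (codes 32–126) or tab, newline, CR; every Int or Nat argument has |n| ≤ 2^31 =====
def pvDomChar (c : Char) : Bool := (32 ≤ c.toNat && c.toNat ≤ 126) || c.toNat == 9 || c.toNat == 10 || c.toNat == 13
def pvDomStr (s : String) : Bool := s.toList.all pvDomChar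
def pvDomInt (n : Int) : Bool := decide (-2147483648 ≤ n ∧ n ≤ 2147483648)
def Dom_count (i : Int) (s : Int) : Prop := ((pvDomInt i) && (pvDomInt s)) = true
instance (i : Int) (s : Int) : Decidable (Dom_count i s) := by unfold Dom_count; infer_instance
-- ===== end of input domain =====

-- B replaces A's str(i)/power-table index loop with a purely arithmetic right-to-left digit scan (alternative decomposition, same cost).


-- ===== PORT A =====
-- p = [10**i for i in range(50)]
def pvP : List Int := (PySem.List.pyRange 0 50 1).map (fun k => (10 : Int) ^ k.toNat)

-- the loop body of A ('' and one-char strings are represented as List Char: '' = [])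
def pvBodyA (iStr : List Char) (n : Int) (st : List Char × Int) (j : Int) : List Char × Int :=
  let t := st.1
  let s := st.2
  let cj : List Char := (PySem.List.pyGet? iStr j).toList        -- i[j]; j always in range
  if cj ≠ t then
    let y := (PySem.List.pyGet? pvP (n - j - 1)).getD 0          -- IndexError unreachable inside Dom (≤ 11 digits < 50)
    let q := ((PySem.Int.ofChars? cj).getD 0) * y                -- int(i[j]); ValueError only for '-', excluded by Pre_count
    (cj, s + q)
  else (t, s)

def count (i : Int) (s : Int) : Int :=
  let iStr : List Char := PySem.Int.toChars i                    -- i = str(i)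
  let n : Int := iStr.length
  ((PySem.List.pyRange 0 n 1).foldl (pvBodyA iStr n) (([] : List Char), s)).2

-- ===== PORT B =====
-- while i >= 10: d = i % 10; i //= 10; if d != i % 10: s += d * place; place *= 10
def countAltLoop (i : Int) (s : Int) (place : Int) : Int :=
  if h : 10 ≤ i then
    let d := PySem.Int.mod i 10
    let i' := PySem.Int.floordiv i 10
    countAltLoop i' (if d ≠ PySem.Int.mod i' 10 then s + d * place else s) (place * 10)
  else s + PySem.Int.mod i 10 * place
termination_by i.toNat
decreasing_by
  rw [PySem.Int.floordiv_eq_ediv_of_pos (by norm_num : (0:Int) < 10)]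
  omega

def count_alt (i : Int) (s : Int) : Int := countAltLoop i s 1

-- ===== PRECONDITION & SPEC =====
-- Pre_count excludes negative i, on which A raises ValueError (int('-') on the leading sign character).
def Pre_count (i : Int) (s : Int) : Prop := 0 ≤ i
instance (i : Int) (s : Int) : Decidable (Pre_count i s) := by unfold Pre_count; infer_instance
def pvWitness_count : Int × Int := (1204, 7)

def Spec_count (i : Int) (s : Int) (out : Int) : Prop := out = count_alt i s
instance (i : Int) (s : Int) (out : Int) : Decidable (Spec_count i s out) := by unfold Spec_count; infer_instance

-- ===== CLAIM (what is proved, stated in full; the proofs are below) =====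
def Claim_equal_count : Prop := ∀ (i : Int) (s : Int), Dom_count i s → Pre_count i s → Spec_count i s (count i s)

-- ===== LEMMAS AND PROOFS =====

-- the common value: contribution of the digits of m (each digit counted at its place value
-- when it differs from its left neighbour; the leading digit always counted)
def pvC (m : Nat) : Int :=
  if m < 10 then (m : Int)
  else 10 * pvC (m / 10) + (if m % 10 ≠ (m / 10) % 10 then ((m % 10 : Nat) : Int) else 0)
decreasing_by omega

def pvDigit (c : Char) : Int := (PySem.Int.ofChars? [c]).getD 0

def pvV : List Char → List Char → Int
  | [], _ => 0
  | c :: rest, t => (if [c] ≠ t then pvDigit c * 10 ^ rest.length else 0) + pvV rest [c]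

def pvF : List Char → List Char → Int → (List Char × Int)
  | [], t, s => (t, s)
  | c :: rest, t, s => pvF rest [c] (s + (if [c] ≠ t then pvDigit c * 10 ^ rest.length else 0))

def pvPrev (ds : List Char) (t : List Char) : List Char :=
  match ds.getLast? with
  | some d => [d]
  | none => t

lemma pv_tdc_append (f : Nat) : ∀ (n : Nat) (l : List Char),
    Nat.toDigitsCore 10 f n l = Nat.toDigitsCore 10 f n [] ++ l := by
  induction f with
  | zero => intro n l; simp [Nat.toDigitsCore]
  | succ f ih =>
    intro n l
    simp only [Nat.toDigitsCore]
    split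
    · simp
    · rw [ih (n / 10) (Nat.digitChar (n % 10) :: l), ih (n / 10) [Nat.digitChar (n % 10)]]
      simp

lemma pv_tdc_fuel (n : Nat) : ∀ (f₁ f₂ : Nat), n < f₁ → n < f₂ → ∀ (l : List Char),
    Nat.toDigitsCore 10 f₁ n l = Nat.toDigitsCore 10 f₂ n l := by
  induction n using Nat.strong_induction_on with
  | _ n ih =>
    intro f₁ f₂ h1 h2 l
    match f₁, f₂ with
    | g₁ + 1, g₂ + 1 =>
      simp only [Nat.toDigitsCore]
      split
      · rfl
      · exact ih (n / 10) (by omega) g₁ g₂ (by omega) (by omega) _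

lemma pv_toDigits_lt {n : Nat} (h : n < 10) : Nat.toDigits 10 n = [Nat.digitChar n] := by
  simp only [Nat.toDigits, Nat.toDigitsCore]
  rw [if_pos (by omega : n / 10 = 0), Nat.mod_eq_of_lt h]

lemma pv_toDigits_step {n : Nat} (h : 10 ≤ n) :
    Nat.toDigits 10 n = Nat.toDigits 10 (n / 10) ++ [Nat.digitChar (n % 10)] := by
  show Nat.toDigitsCore 10 (n + 1) n [] = _
  simp only [Nat.toDigitsCore]
  rw [if_neg (by omega : ¬ n / 10 = 0)]
  rw [pv_tdc_fuel (n / 10) n (n / 10 + 1) (by omega) (by omega)]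
  exact pv_tdc_append _ _ _

lemma pv_toDigits_last (n : Nat) :
    (Nat.toDigits 10 n).getLast? = some (Nat.digitChar (n % 10)) := by
  by_cases h : n < 10
  · rw [pv_toDigits_lt h, Nat.mod_eq_of_lt h]; rfl
  · rw [pv_toDigits_step (by omega)]; simp

lemma pvDigit_digitChar {r : Nat} (h : r < 10) : pvDigit (Nat.digitChar r) = (r : Int) := by
  interval_cases r <;> decide

lemma pv_digitChar_inj {a b : Nat} (ha : a < 10) (hb : b < 10) :
    Nat.digitChar a = Nat.digitChar b ↔ a = b := by
  interval_cases a <;> interval_cases b <;> decide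

lemma pvPrev_cons (d : Char) (ds : List Char) (t : List Char) :
    pvPrev (d :: ds) t = pvPrev ds [d] := by
  cases ds with
  | nil => rfl
  | cons d' ds' =>
    cases e : (d' :: ds').getLast? with
    | none => simp at e
    | some x => simp [pvPrev, List.getLast?_cons_cons, e]

lemma pvV_snoc : ∀ (ds : List Char) (t : List Char) (c : Char),
    pvV (ds ++ [c]) t = 10 * pvV ds t + (if [c] ≠ pvPrev ds t then pvDigit c else 0) := by
  intro ds
  induction ds with
  | nil =>
    intro t c
    simp only [List.nil_append, pvV, pvPrev, List.getLast?_nil, pow_zero, List.length_nil]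
    split_ifs <;> ring
  | cons d ds ih =>
    intro t c
    simp only [List.cons_append, pvV, ih, pvPrev_cons, List.length_append,
      List.length_cons, List.length_nil]
    split_ifs <;> ring

lemma pvV_toDigits (m : Nat) : pvV (Nat.toDigits 10 m) [] = pvC m := by
  induction m using Nat.strong_induction_on with
  | _ m ih =>
    by_cases h : m < 10
    · rw [pv_toDigits_lt h, pvC]
      simp [pvV, pvDigit_digitChar h, if_pos h]
    · have hmC : pvC m = 10 * pvC (m / 10) +
          (if m % 10 ≠ m / 10 % 10 then ((m % 10 : Nat) : Int) else 0) := by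
        rw [pvC, if_neg h]
      rw [pv_toDigits_step (by omega), pvV_snoc, ih (m / 10) (by omega), hmC]
      have hprev : pvPrev (Nat.toDigits 10 (m / 10)) [] = [Nat.digitChar (m / 10 % 10)] := by
        simp [pvPrev, pv_toDigits_last]
      rw [hprev]
      have hcond : ([Nat.digitChar (m % 10)] ≠ [Nat.digitChar (m / 10 % 10)]) ↔
          (m % 10 ≠ m / 10 % 10) := by
        simp [pv_digitChar_inj (Nat.mod_lt _ (by omega)) (Nat.mod_lt _ (by omega))]
      rw [if_congr hcond rfl rfl]
      split_ifs with hc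
      · rw [pvDigit_digitChar (Nat.mod_lt _ (by omega))]
      · ring

lemma pvP_get {j : Nat} (h : j < 50) :
    PySem.List.pyGet? pvP ((j : Nat) : Int) = some ((10 : Int) ^ j) := by
  rw [pvP, PySem.List.pyGet?_natCast]
  rw [List.getElem?_map]
  rw [List.getElem?_eq_getElem (by simpa [PySem.List.length_pyRange_one] using h)]
  simp [PySem.List.getElem_pyRange_one]

lemma pvF_snd : ∀ (ch : List Char) (t : List Char) (s : Int),
    (pvF ch t s).2 = s + pvV ch t := by
  intro ch
  induction ch with
  | nil => intro t s; simp [pvF, pvV]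
  | cons c rest ih => intro t s; simp [pvF, pvV, ih]; ring

lemma pv_foldA (ch : List Char) (hlen : ch.length ≤ 50) :
    ∀ (k : Nat) (t : List Char) (s : Int), k ≤ ch.length →
    (PySem.List.pyRange (k : Int) (ch.length : Int) 1).foldl
      (pvBodyA ch (ch.length : Int)) (t, s) = pvF (ch.drop k) t s := by
  intro k
  induction hd : ch.length - k generalizing k with
  | zero =>
    intro t s hk
    have hk' : k = ch.length := by omega
    subst hk'
    rw [PySem.List.pyRange_one_eq_nil (le_refl _)]
    simp [pvF, List.drop_length]
  | succ d ih =>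
    intro t s hk
    have hklt : k < ch.length := by omega
    rw [PySem.List.pyRange_one_cons (by exact_mod_cast hklt)]
    have hdrop : ch.drop k = ch[k] :: ch.drop (k + 1) := List.drop_eq_getElem_cons hklt
    have hget : PySem.List.pyGet? ch ((k : Nat) : Int) = some ch[k] := by
      rw [PySem.List.pyGet?_natCast, List.getElem?_eq_getElem hklt]
    have hidx : ((ch.length : Int) - (k : Int) - 1) = ((ch.length - k - 1 : Nat) : Int) := by
      omega
    have hy : (PySem.List.pyGet? pvP ((ch.length : Int) - (k : Int) - 1)).getD 0
        = (10 : Int) ^ (ch.length - k - 1) := by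
      rw [hidx, pvP_get (by omega)]; rfl
    have hplen : (ch.drop (k + 1)).length = ch.length - k - 1 := by
      simp [List.length_drop]; omega
    have hstep : pvBodyA ch (ch.length : Int) (t, s) ((k : Nat) : Int)
        = ([ch[k]], s + (if [ch[k]] ≠ t then pvDigit ch[k] * 10 ^ (ch.drop (k + 1)).length else 0)) := by
      simp only [pvBodyA, hget, Option.toList_some, hy, hplen, pvDigit]
      split_ifs with hne
      · rfl
      · push_neg at hne
        simp [hne]
    have hcast : ((k : Int) + 1) = (((k + 1 : Nat)) : Int) := by push_cast; ring
    rw [List.foldl_cons, hstep, hcast, ih (k + 1) (by omega)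
      ([ch[k]]) _ (by omega), hdrop]
    rfl

lemma pv_countA (i : Int) (s : Int) (h0 : 0 ≤ i) (hbound : i ≤ 2147483648) :
    count i s = s + pvC i.toNat := by
  have hstr : PySem.Int.toChars i = Nat.toDigits 10 i.toNat := by
    simp [PySem.Int.toChars, not_lt.mpr h0]
  have hlen : (Nat.toDigits 10 i.toNat).length ≤ 10 := by
    apply Nat.toDigits_length 10 i.toNat 10 (by norm_num)
    have : i.toNat ≤ 2147483648 := by omega
    calc i.toNat ≤ 2147483648 := this
      _ < 10 ^ 10 := by norm_num
  rw [count]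
  simp only [hstr]
  have := pv_foldA (Nat.toDigits 10 i.toNat) (by omega) 0 [] s (by omega)
  rw [(by norm_num : ((0 : Nat) : Int) = 0)] at this
  rw [this, List.drop_zero, pvF_snd, pvV_toDigits]

lemma pv_countAltLoop (i : Int) (s place : Int) (h0 : 0 ≤ i) :
    countAltLoop i s place = s + pvC i.toNat * place := by
  induction hm : i.toNat using Nat.strong_induction_on generalizing i s place with
  | _ m ih =>
    by_cases h : 10 ≤ i
    · rw [countAltLoop, dif_pos h]
      have hdiv : PySem.Int.floordiv i 10 = i / 10 :=
        PySem.Int.floordiv_eq_ediv_of_pos (by norm_num)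
      have hmod : PySem.Int.mod i 10 = i % 10 :=
        PySem.Int.mod_eq_emod_of_pos (by norm_num)
      have hmod' : PySem.Int.mod (PySem.Int.floordiv i 10) 10 = (i / 10) % 10 := by
        rw [hdiv, PySem.Int.mod_eq_emod_of_pos (by norm_num)]
      have hrec := ih ((i / 10).toNat) (by omega) (i / 10)
        (if PySem.Int.mod i 10 ≠ PySem.Int.mod (PySem.Int.floordiv i 10) 10 then
          s + PySem.Int.mod i 10 * place else s) (place * 10) (by omega) rfl
      rw [hdiv] at hrec ⊢
      rw [hrec]
      have hmC : pvC m = 10 * pvC (m / 10) + (if m % 10 ≠ m / 10 % 10 then ((m % 10 : Nat) : Int) else 0) := by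
        rw [pvC, if_neg (by omega)]
      have h1 : (i / 10).toNat = m / 10 := by omega
      have h2 : i % 10 = ((m % 10 : Nat) : Int) := by omega
      have h3 : (i / 10) % 10 = ((m / 10 % 10 : Nat) : Int) := by omega
      have hcond : (PySem.Int.mod i 10 ≠ PySem.Int.mod (i / 10) 10) ↔ (m % 10 ≠ m / 10 % 10) := by
        rw [hmod, PySem.Int.mod_eq_emod_of_pos (by norm_num), h2, h3]
        exact not_congr Int.natCast_inj
      rw [h1, hmC]
      rw [if_congr hcond rfl rfl]
      split_ifs with hc
      · rw [hmod, h2]; ring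
      · ring
    · rw [countAltLoop, dif_neg h, PySem.Int.mod_eq_emod_of_pos (by norm_num)]
      have : i % 10 = i := by omega
      rw [this]
      have : pvC m = (m : Int) := by rw [pvC, if_pos (by omega)]
      rw [this]
      have : (m : Int) = i := by omega
      rw [this]

-- ===== VERDICT (by name: the statement is the Claim_ definition above) =====
theorem count_spec : Claim_equal_count := by
  intro i s hdom hpre
  unfold Spec_count
  have h0 : 0 ≤ i := hpre
  have hb : i ≤ 2147483648 := by
    have := hdom
    unfold Dom_count pvDomInt at this
    simp only [Bool.and_eq_true, decide_eq_true_eq] at this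
    exact this.1.2
  rw [pv_countA i s h0 hb, count_alt, pv_countAltLoop i s 1 h0, mul_one]
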